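-- pv_equiv track=rewrite | github.com/sethbroberts/fundamentals_of_measurement | fom.py | find_equivalence_relation_from_cyclic_subgroup
-- ===== SOURCE A (Python) =====
-- def remove_redundant_items(redundant_list):
--     "Remove redundant items from a list"
--     non_redundant_list = []
--     for item in redundant_list:
--         if item not in non_redundant_list:
--             non_redundant_list.append(item)
--     non_redundant_list.sort()
--     return non_redundant_list
--
-- def find_equivalence_relation_from_cyclic_subgroup(cyclic_subgroup):
--     "Given a cyclic subgroup, find the corresponding equivalence relation"
--     equivalence_relation_redundant = []
--     for automorphism in cyclic_subgroup:
--         for element in automorphism: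
--             equivalence_relation_redundant.append(element)
--     equivalence_relation = remove_redundant_items(equivalence_relation_redundant)
--     equivalence_relation.sort()
--     return equivalence_relation
-- ===== SOURCE B (Python) =====
-- def find_equivalence_relation_from_cyclic_subgroup(cyclic_subgroup):
--     "Given a cyclic subgroup, find the corresponding equivalence relation"
--     flat = sorted(element for automorphism in cyclic_subgroup for element in automorphism)
--     equivalence_relation = []
--     for element in flat:
--         if not equivalence_relation or equivalence_relation[-1] != element:
--             equivalence_relation.append(element)
--     return equivalence_relation
-- ===== Notes on version B (the rewrite author's own statement) =====
-- stated objective: faster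
-- what changed: Replaces the O(n^2) membership-scan dedup followed by two sorts with a single sort of the flattened list followed by one linear adjacent-duplicate pass.
import Mathlib
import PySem

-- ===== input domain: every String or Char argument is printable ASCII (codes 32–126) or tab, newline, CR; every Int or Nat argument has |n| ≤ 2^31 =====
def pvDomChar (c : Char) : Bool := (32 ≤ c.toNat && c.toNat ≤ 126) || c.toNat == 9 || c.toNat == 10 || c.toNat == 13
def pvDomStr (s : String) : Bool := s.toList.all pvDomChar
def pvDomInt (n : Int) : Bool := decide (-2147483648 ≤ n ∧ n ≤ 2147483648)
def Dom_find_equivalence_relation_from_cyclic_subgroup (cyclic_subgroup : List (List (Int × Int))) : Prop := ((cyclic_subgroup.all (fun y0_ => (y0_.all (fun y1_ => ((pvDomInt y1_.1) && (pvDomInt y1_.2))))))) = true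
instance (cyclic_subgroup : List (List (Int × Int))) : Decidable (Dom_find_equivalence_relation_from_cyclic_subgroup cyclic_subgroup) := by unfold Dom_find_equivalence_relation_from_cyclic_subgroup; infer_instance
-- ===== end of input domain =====

-- B flattens once, sorts once, and removes duplicates in a single adjacent-comparison pass,
-- replacing A's quadratic membership-based dedup followed by two sorts; return value proved equal on all inputs.

-- ===== PORT A =====
def remove_redundant_items (redundant_list : List (Int × Int)) : List (Int × Int) :=
  let non_redundant_list :=
    redundant_list.foldl (fun acc item => if item ∈ acc then acc else acc ++ [item]) []
  PySem.List.sorted2 non_redundant_list Prod.fst Prod.snd false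

def find_equivalence_relation_from_cyclic_subgroup (cyclic_subgroup : List (List (Int × Int))) : List (Int × Int) :=
  let equivalence_relation_redundant :=
    cyclic_subgroup.foldl
      (fun acc automorphism => automorphism.foldl (fun acc element => acc ++ [element]) acc) []
  let equivalence_relation := remove_redundant_items equivalence_relation_redundant
  PySem.List.sorted2 equivalence_relation Prod.fst Prod.snd false

-- ===== PORT B =====
def find_equivalence_relation_from_cyclic_subgroup_alt (cyclic_subgroup : List (List (Int × Int))) : List (Int × Int) :=
  let flat := PySem.List.sorted2 (cyclic_subgroup.flatMap (fun automorphism => automorphism)) Prod.fst Prod.snd false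
  flat.foldl
    (fun equivalence_relation element =>
      if equivalence_relation = [] ∨ equivalence_relation.getLast? ≠ some element
      then equivalence_relation ++ [element] else equivalence_relation) []

-- ===== PRECONDITION & SPEC =====
def Spec_find_equivalence_relation_from_cyclic_subgroup (cyclic_subgroup : List (List (Int × Int))) (out : List (Int × Int)) : Prop := out = find_equivalence_relation_from_cyclic_subgroup_alt cyclic_subgroup
instance (cyclic_subgroup : List (List (Int × Int))) (out : List (Int × Int)) : Decidable (Spec_find_equivalence_relation_from_cyclic_subgroup cyclic_subgroup out) := by unfold Spec_find_equivalence_relation_from_cyclic_subgroup; infer_instance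

-- ===== CLAIM (what is proved, stated in full; the proofs are below) =====
def Claim_equal_find_equivalence_relation_from_cyclic_subgroup : Prop := ∀ (cyclic_subgroup : List (List (Int × Int))), Dom_find_equivalence_relation_from_cyclic_subgroup cyclic_subgroup → Spec_find_equivalence_relation_from_cyclic_subgroup cyclic_subgroup (find_equivalence_relation_from_cyclic_subgroup cyclic_subgroup)

-- ===== LEMMAS AND PROOFS =====

-- Python's comparison on int pairs is the lexicographic order: sorted2 with fst/snd keys is
-- sorted with the (Mathlib-linear-ordered) key `toLex`.
theorem pv_sorted2_eq_sorted_toLex (xs : List (Int × Int)) :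
    PySem.List.sorted2 xs Prod.fst Prod.snd false
      = PySem.List.sorted xs (fun x => (toLex x : Lex (Int × Int))) false := by
  show List.foldl _ [] xs = List.foldl _ [] xs
  congr 1
  funext acc x
  congr 1
  funext a b
  show (decide (a.1 < b.1) || (!decide (b.1 < a.1) && decide (a.2 < b.2))) = decide (toLex a < toLex b)
  rw [Bool.eq_iff_iff]
  simp only [Bool.or_eq_true, Bool.and_eq_true, Bool.not_eq_true', decide_eq_true_iff,
    decide_eq_false_iff_not, Prod.Lex.toLex_lt_toLex]
  omega

theorem pv_dedup_loop_eq (xs : List (Int × Int)) :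
    xs.foldl (fun acc item => if item ∈ acc then acc else acc ++ [item]) [] = PySem.List.dedup xs := by
  have h : (fun (acc : List (Int × Int)) item => if item ∈ acc then acc else acc ++ [item])
      = PySem.Set.add := by
    funext acc item
    simp [PySem.Set.add]
  simp [PySem.List.dedup, PySem.Set.ofList, PySem.Set.empty, h]

theorem pv_flatten_loop_eq (cs : List (List (Int × Int))) (acc : List (Int × Int)) :
    cs.foldl (fun acc automorphism => automorphism.foldl (fun acc element => acc ++ [element]) acc) acc
      = acc ++ cs.flatten := by
  induction cs generalizing acc with
  | nil => simp
  | cons a t ih =>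
    rw [List.foldl_cons, PySem.List.foldl_append_singleton, ih, List.flatten_cons,
      List.append_assoc]

-- membership through B's adjacent-dedup pass
theorem pv_mem_dd (l : List (Int × Int)) (acc : List (Int × Int)) (x : Int × Int) :
    x ∈ l.foldl
        (fun r e => if r = [] ∨ r.getLast? ≠ some e then r ++ [e] else r) acc
      ↔ x ∈ acc ∨ x ∈ l := by
  induction l generalizing acc with
  | nil => simp
  | cons e t ih =>
    by_cases h : acc = [] ∨ acc.getLast? ≠ some e
    · simp only [List.foldl_cons, if_pos h, ih, List.mem_append, List.mem_cons]
      tauto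
    · have h2 : acc.getLast? = some e := by
        by_contra hne
        exact h (Or.inr hne)
      have he : e ∈ acc := List.mem_of_getLast? h2
      rw [List.foldl_cons, if_neg h, ih]
      simp only [List.mem_cons]
      constructor
      · tauto
      · rintro (h1 | h1 | h1)
        · tauto
        · subst h1; exact Or.inl he
        · tauto

-- B's adjacent-dedup pass over a ≤-sorted list is strictly sorted
theorem pv_dd_pairwise (l : List (Int × Int)) (acc : List (Int × Int))
    (hl : l.Pairwise (fun a b => (toLex a : Lex (Int × Int)) ≤ toLex b))
    (hacc : acc.Pairwise (fun a b => (toLex a : Lex (Int × Int)) < toLex b))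
    (hcross : ∀ a ∈ acc, ∀ b ∈ l, (toLex a : Lex (Int × Int)) ≤ toLex b) :
    (l.foldl (fun r e => if r = [] ∨ r.getLast? ≠ some e then r ++ [e] else r) acc).Pairwise
      (fun a b => (toLex a : Lex (Int × Int)) < toLex b) := by
  induction l generalizing acc with
  | nil => simpa using hacc
  | cons e t ih =>
    rw [List.pairwise_cons] at hl
    by_cases h : acc = [] ∨ acc.getLast? ≠ some e
    · rw [List.foldl_cons, if_pos h]
      apply ih _ hl.2
      · rw [List.pairwise_append]
        refine ⟨hacc, by simp, ?_⟩
        intro a ha b hb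
        rw [List.mem_singleton] at hb
        suffices hlt : (toLex a : Lex (Int × Int)) < toLex e by rw [hb]; exact hlt
        have hle : (toLex a : Lex (Int × Int)) ≤ toLex e := hcross a ha e (List.mem_cons_self)
        rcases h with h | h
        · simp [h] at ha
        · -- a ≠ e: if a = e then e would be ≥ the last element while strictly above it
          rcases eq_or_ne a e with rfl | hne
          · exfalso
            have hne' : acc ≠ [] := by rintro rfl; simp at ha
            have hsplit := List.dropLast_append_getLast hne'
            have hgl : acc.getLast hne' ∈ acc := List.getLast_mem hne'
            have hlast_ne : acc.getLast hne' ≠ a := by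
              intro hEq
              exact h (by rw [← hEq, List.getLast?_eq_some_getLast])
            have hle_last : (toLex (acc.getLast hne') : Lex (Int × Int)) ≤ toLex a :=
              hcross _ hgl a (List.mem_cons_self)
            -- a is in dropLast (it is ≠ last), so a < last, contradicting last ≤ a
            have ha2 : a ∈ acc.dropLast ++ [acc.getLast hne'] := by rw [hsplit]; exact ha
            have ha' : a ∈ acc.dropLast ∨ a = acc.getLast hne' := by
              rcases List.mem_append.mp ha2 with h1 | h1
              · exact Or.inl h1
              · exact Or.inr (by simpa using h1)
            rcases ha' with ha' | ha'
            · have hpw := hacc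
              rw [← hsplit, List.pairwise_append] at hpw
              have : (toLex a : Lex (Int × Int)) < toLex (acc.getLast hne') :=
                hpw.2.2 a ha' _ (by simp)
              exact absurd (lt_of_le_of_lt hle_last this) (lt_irrefl _)
            · exact hlast_ne ha'.symm
          · exact lt_of_le_of_ne hle (fun hEq => hne (toLex.injective hEq))
      · intro a ha b hb
        rcases (List.mem_append.mp ha) with ha | ha
        · exact hcross a ha b (List.mem_cons_of_mem _ hb)
        · rw [List.mem_singleton] at ha; subst ha
          exact hl.1 b hb
    · rw [List.foldl_cons, if_neg h]
      exact ih _ hl.2 hacc (fun a ha b hb => hcross a ha b (List.mem_cons_of_mem _ hb))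

-- ===== VERDICT (by name: the statement is the Claim_ definition above) =====
theorem find_equivalence_relation_from_cyclic_subgroup_spec : Claim_equal_find_equivalence_relation_from_cyclic_subgroup := by
  intro cs _hdom
  show find_equivalence_relation_from_cyclic_subgroup cs
      = find_equivalence_relation_from_cyclic_subgroup_alt cs
  simp only [find_equivalence_relation_from_cyclic_subgroup,
    find_equivalence_relation_from_cyclic_subgroup_alt, remove_redundant_items]
  rw [pv_flatten_loop_eq, List.nil_append, pv_dedup_loop_eq]
  have hflat : cs.flatMap (fun automorphism => automorphism) = cs.flatten := by
    simp
  rw [hflat, pv_sorted2_eq_sorted_toLex, pv_sorted2_eq_sorted_toLex, pv_sorted2_eq_sorted_toLex,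
    PySem.List.sorted_sorted]
  have hpw := pv_dd_pairwise
    (PySem.List.sorted cs.flatten (fun x => (toLex x : Lex (Int × Int))) false) []
    (PySem.List.sorted_pairwise _ _) (by simp) (by simp)
  refine PySem.List.sorted_eq_of_perm_of_pairwise_lt _ _ _ ?_ hpw
  have hnd : (List.foldl (fun r e => if r = [] ∨ r.getLast? ≠ some e then r ++ [e] else r) []
      (PySem.List.sorted cs.flatten (fun x => (toLex x : Lex (Int × Int))) false)).Nodup :=
    hpw.imp (fun hab hEq => absurd hab (by rw [hEq]; exact lt_irrefl _))
  rw [List.perm_ext_iff_of_nodup hnd (PySem.List.nodup_dedup _)]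
  intro x
  rw [pv_mem_dd, PySem.List.mem_sorted, PySem.List.mem_dedup]
  simp only [List.not_mem_nil, false_or]
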